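-- pv_equiv track=rewrite | github.com/GoninM/GB_AlgorithmStructurePython | task_5.py | find_index_max_negative_element
-- ===== SOURCE A (Python) =====
-- def find_index_max_negative_element(input_list):
--     index = -1
--
--     for item in input_list:
--         if item < 0 and index == -1:
--             index = input_list.index(item)
--         elif item < 0:
--             if abs(item) < abs(input_list[index]):
--                 index = input_list.index(item)
--         else:
--             pass
--
--     return index
-- ===== SOURCE B (Python) =====
-- def find_index_max_negative_element(input_list):
--     candidates = [(abs(x), i) for i, x in enumerate(input_list) if x < 0]
--     if not candidates:
--         return -1
--     return min(candidates)[1]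
-- ===== Notes on version B (the rewrite author's own statement) =====
-- stated objective: alternative
-- what changed: A's fused running-best scan that calls list.index (an inner scan) on every improving negative item is replaced by building the list of (abs(x), index) pairs of negative elements once via enumerate and returning the second component of its minimum.
import Mathlib
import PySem

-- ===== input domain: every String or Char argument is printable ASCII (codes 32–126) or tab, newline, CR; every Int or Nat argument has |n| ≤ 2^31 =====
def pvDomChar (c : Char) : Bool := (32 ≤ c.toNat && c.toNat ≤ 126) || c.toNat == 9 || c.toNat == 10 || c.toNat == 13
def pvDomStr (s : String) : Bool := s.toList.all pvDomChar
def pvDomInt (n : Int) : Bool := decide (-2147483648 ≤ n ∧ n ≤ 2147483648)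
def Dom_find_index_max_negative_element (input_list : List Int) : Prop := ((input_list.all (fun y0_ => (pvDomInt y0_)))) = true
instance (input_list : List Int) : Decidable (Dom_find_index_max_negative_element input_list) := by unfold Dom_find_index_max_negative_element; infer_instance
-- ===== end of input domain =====

-- B replaces A's running-best scan (which re-scans the list via list.index on every
-- negative item) by building the (abs, index) pairs of the negatives once and taking min.

-- ===== PORT A =====
-- `.getD 0` ports Python's raising lookups at spots they cannot fail here:
-- `input_list.index(item)` is called with item ∈ input_list, and `input_list[index]`
-- only with an index previously produced by `.index` (in range, nonnegative).
def pvStepA (input_list : List Int) (index item : Int) : Int :=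
  if item < 0 ∧ index = -1 then
    (((PySem.List.index? input_list item).getD 0 : Nat) : Int)
  else if item < 0 then
    if |item| < |(PySem.List.pyGet? input_list index).getD 0| then
      (((PySem.List.index? input_list item).getD 0 : Nat) : Int)
    else index
  else index

def find_index_max_negative_element (input_list : List Int) : Int :=
  input_list.foldl (pvStepA input_list) (-1)

-- ===== PORT B =====
def pvCands (input_list : List Int) : List (Int × Int) :=
  ((PySem.List.enumerate input_list 0).filter (fun q => decide (q.2 < 0))).map
    (fun q => (|q.2|, q.1))

def find_index_max_negative_element_alt (input_list : List Int) : Int :=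
  match PySem.List.min2? (pvCands input_list) (fun q => q.1) (fun q => q.2) with
  | none => -1
  | some m => m.2

-- ===== PRECONDITION & SPEC =====
def Spec_find_index_max_negative_element (input_list : List Int) (out : Int) : Prop := out = find_index_max_negative_element_alt input_list
instance (input_list : List Int) (out : Int) : Decidable (Spec_find_index_max_negative_element input_list out) := by unfold Spec_find_index_max_negative_element; infer_instance

-- ===== CLAIM (what is proved, stated in full; the proofs are below) =====
def Claim_equal_find_index_max_negative_element : Prop := ∀ (input_list : List Int), Dom_find_index_max_negative_element input_list → Spec_find_index_max_negative_element input_list (find_index_max_negative_element input_list)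

-- ===== LEMMAS AND PROOFS =====

-- the binary step of min2? with keys fst/snd, specialised to Int × Int
def pvMinStep (acc : Option (Int × Int)) (x : Int × Int) : Option (Int × Int) :=
  match acc with
  | none => some x
  | some m => if x.1 < m.1 ∨ (¬ m.1 < x.1 ∧ x.2 < m.2) then some x else some m

lemma min2?_eq_foldl (l : List (Int × Int)) :
    PySem.List.min2? l (fun q => q.1) (fun q => q.2) = l.foldl pvMinStep none := by
  unfold PySem.List.min2?
  congr 1
  funext acc x
  cases acc with
  | none => rfl
  | some m => simp [pvMinStep]

lemma foldl_pvMinStep_some_ne_none (l : List (Int × Int)) (a : Int × Int) :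
    l.foldl pvMinStep (some a) ≠ none := by
  induction l generalizing a with
  | nil => simp
  | cons y t ih =>
      simp only [List.foldl_cons, pvMinStep]
      split <;> exact ih _

lemma foldl_pvMinStep_mem (l : List (Int × Int)) (a m : Int × Int)
    (h : l.foldl pvMinStep (some a) = some m) : m = a ∨ m ∈ l := by
  induction l generalizing a with
  | nil => simp at h; exact Or.inl h.symm
  | cons y t ih =>
      simp only [List.foldl_cons, pvMinStep] at h
      split at h
      · rcases ih _ h with h' | h' <;> simp [h']
      · rcases ih _ h with h' | h' <;> simp [h']

lemma foldl_pvMinStep_fst_le (l : List (Int × Int)) (a m : Int × Int)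
    (h : l.foldl pvMinStep (some a) = some m) : m.1 ≤ a.1 ∧ ∀ y ∈ l, m.1 ≤ y.1 := by
  induction l generalizing a with
  | nil => simp at h; simp [h]
  | cons y t ih =>
      simp only [List.foldl_cons, pvMinStep] at h
      split at h
      · rcases ih _ h with ⟨h1, h2⟩
        rename_i hc
        refine ⟨by rcases hc with hc | ⟨hc, _⟩ <;> omega, fun z hz => ?_⟩
        rcases List.mem_cons.1 hz with rfl | hz
        · exact h1
        · exact h2 z hz
      · rcases ih _ h with ⟨h1, h2⟩
        rename_i hc
        rw [not_or] at hc
        refine ⟨h1, fun z hz => ?_⟩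
        rcases List.mem_cons.1 hz with rfl | hz
        · have hc1 := hc.1
          omega
        · exact h2 z hz

-- min2? returns a member whose first key is minimal
lemma min2?_spec (l : List (Int × Int)) (m : Int × Int)
    (h : PySem.List.min2? l (fun q => q.1) (fun q => q.2) = some m) :
    m ∈ l ∧ ∀ y ∈ l, m.1 ≤ y.1 := by
  rw [min2?_eq_foldl] at h
  cases l with
  | nil => simp at h
  | cons y t =>
      simp only [List.foldl_cons, pvMinStep] at h
      have h1 := foldl_pvMinStep_mem t y m h
      have h2 := foldl_pvMinStep_fst_le t y m h
      constructor
      · rcases h1 with rfl | h1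
        · simp
        · simp [h1]
      · intro z hz
        rcases List.mem_cons.1 hz with rfl | hz
        · exact h2.1
        · exact h2.2 z hz

-- characterisation of membership in pvCands
lemma mem_pvCands_iff (p : List Int) (m : Int × Int) :
    m ∈ pvCands p ↔ ∃ (k : Nat) (hk : k < p.length), p[k] < 0 ∧ m = (|p[k]|, (k : Int)) := by
  simp only [pvCands, List.mem_map, List.mem_filter, PySem.List.mem_enumerate_iff]
  constructor
  · rintro ⟨q, ⟨⟨k, hk, rfl⟩, hneg⟩, rfl⟩
    simp only [decide_eq_true_eq] at hneg
    exact ⟨k, hk, hneg, by simp⟩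
  · rintro ⟨k, hk, hneg, rfl⟩
    exact ⟨((k : Int), p[k]), ⟨⟨k, hk, by simp⟩, by simpa using hneg⟩, rfl⟩

lemma pvCands_append_neg (p : List Int) (x : Int) (hx : x < 0) :
    pvCands (p ++ [x]) = pvCands p ++ [(|x|, (p.length : Int))] := by
  simp [pvCands, PySem.List.enumerate_append, PySem.List.enumerate_cons,
    PySem.List.enumerate_nil, List.filter_append, hx]

lemma pvCands_append_nonneg (p : List Int) (x : Int) (hx : ¬ x < 0) :
    pvCands (p ++ [x]) = pvCands p := by
  simp [pvCands, PySem.List.enumerate_append, PySem.List.enumerate_cons,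
    PySem.List.enumerate_nil, List.filter_append, hx]

lemma min2?_none_iff (l : List (Int × Int)) :
    PySem.List.min2? l (fun q => q.1) (fun q => q.2) = none ↔ l = [] := by
  rw [min2?_eq_foldl]
  cases l with
  | nil => simp
  | cons y t =>
      simp only [List.foldl_cons, pvMinStep]
      exact ⟨fun h => absurd h (foldl_pvMinStep_some_ne_none t y), by simp⟩

lemma no_neg_of_pvCands_eq_nil (p : List Int) (h : pvCands p = []) : ∀ y ∈ p, ¬ y < 0 := by
  intro y hy hneg
  rcases List.mem_iff_getElem.1 hy with ⟨k, hk, rfl⟩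
  have : (|p[k]|, (k : Int)) ∈ pvCands p := (mem_pvCands_iff p _).2 ⟨k, hk, hneg, rfl⟩
  simp [h] at this

-- first occurrence of x when x ∉ p in p ++ x :: t
lemma index?_prefix_not_mem (p t : List Int) (x : Int) (hx : x ∉ p) :
    PySem.List.index? (p ++ x :: t) x = some p.length := by
  rw [PySem.List.index?_eq_some_iff]
  exact ⟨p, t, rfl, rfl, hx⟩

-- THE HEART: one step of A from B's value on the prefix is B's value on the extended prefix
lemma pvStepA_acc (p : List Int) (x : Int) (t : List Int) :
    pvStepA (p ++ x :: t) (find_index_max_negative_element_alt p) x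
      = find_index_max_negative_element_alt (p ++ [x]) := by
  by_cases hx : x < 0
  · -- x is negative
    rcases h0 : PySem.List.min2? (pvCands p) (fun q => q.1) (fun q => q.2) with _ | m
    · -- no negative in the prefix
      have hnil : pvCands p = [] := (min2?_none_iff _).1 h0
      have hxp : x ∉ p := fun hmem => no_neg_of_pvCands_eq_nil p hnil x hmem hx
      have hidx := index?_prefix_not_mem p t x hxp
      simp only [PySem.List.index?_eq_idxOf?] at hidx
      simp [find_index_max_negative_element_alt, pvStepA, hx, hidx,
        pvCands_append_neg p x hx, hnil, min2?_eq_foldl, pvMinStep]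
    · -- the prefix has a best negative m
      rcases min2?_spec (pvCands p) m h0 with ⟨hmem, hmin'⟩
      rcases (mem_pvCands_iff p m).1 hmem with ⟨k, hk, hneg, rfl⟩
      have hmin : ∀ y ∈ pvCands p, |p[k]| ≤ y.1 := by simpa using hmin'
      have hget : PySem.List.pyGet? (p ++ x :: t) ((k : Nat) : Int) = some p[k] := by
        rw [PySem.List.pyGet?_natCast, List.getElem?_append_left hk]
        simp [hk]
      have hk1 : ¬ (((k : Nat) : Int) = -1) := by omega
      have hR : PySem.List.min2? (pvCands (p ++ [x])) (fun q => q.1) (fun q => q.2)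
          = if |x| < |p[k]| ∨ (¬ |p[k]| < |x| ∧ (p.length : Int) < (k : Int))
            then some (|x|, (p.length : Int)) else some (|p[k]|, (k : Int)) := by
        rw [pvCands_append_neg p x hx, min2?_eq_foldl, List.foldl_append, ← min2?_eq_foldl, h0]
        simp [pvMinStep]
      by_cases habs : |x| < |p[k]|
      · have hxp : x ∉ p := by
          intro hmemx
          rcases List.mem_iff_getElem.1 hmemx with ⟨j, hj, hjx⟩
          have hmemc : (|x|, (j : Int)) ∈ pvCands p :=
            (mem_pvCands_iff p _).2 ⟨j, hj, by rw [hjx]; exact hx, by rw [hjx]⟩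
          have hle := hmin _ hmemc
          simp only at hle
          exact absurd habs (not_lt.2 hle)
        have hidx := index?_prefix_not_mem p t x hxp
        have hcond : |x| < |p[k]| ∨ (¬ |p[k]| < |x| ∧ (p.length : Int) < (k : Int)) := Or.inl habs
        rw [show find_index_max_negative_element_alt (p ++ [x]) = ((p.length : Nat) : Int) from by
          simp only [find_index_max_negative_element_alt, hR, if_pos hcond]]
        simp only [PySem.List.index?_eq_idxOf?] at hidx
        simp [pvStepA, hx, hk1, hget, habs, h0, find_index_max_negative_element_alt, hidx]
      · have hcond : ¬ (|x| < |p[k]| ∨ (¬ |p[k]| < |x| ∧ (p.length : Int) < (k : Int))) := by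
          intro hor
          rcases hor with h | ⟨_, h2⟩
          · exact habs h
          · omega
        rw [show find_index_max_negative_element_alt (p ++ [x]) = ((k : Nat) : Int) from by
          simp only [find_index_max_negative_element_alt, hR, if_neg hcond]]
        simp [pvStepA, hx, hk1, hget, habs, h0, find_index_max_negative_element_alt]
  · -- x nonnegative: A keeps its index, B's candidate list is unchanged
    simp [pvStepA, hx, find_index_max_negative_element_alt, pvCands_append_nonneg p x hx]

lemma pv_run (s : List Int) : ∀ p : List Int,
    s.foldl (pvStepA (p ++ s)) (find_index_max_negative_element_alt p)
      = find_index_max_negative_element_alt (p ++ s) := by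
  induction s with
  | nil => intro p; simp
  | cons x s' ih =>
      intro p
      simp only [List.foldl_cons]
      rw [pvStepA_acc p x s']
      have := ih (p ++ [x])
      simpa [List.append_assoc] using this

-- ===== VERDICT (by name: the statement is the Claim_ definition above) =====
theorem find_index_max_negative_element_spec : Claim_equal_find_index_max_negative_element := by
  intro input_list _
  show find_index_max_negative_element input_list = find_index_max_negative_element_alt input_list
  have := pv_run input_list []
  simpa [find_index_max_negative_element, find_index_max_negative_element_alt, pvCands,
    PySem.List.enumerate_nil, PySem.List.min2?] using this
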